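-- pv_equiv track=rewrite | github.com/SystemicVoid/H-Neurons | scripts/build_full_paper.py | extract_first_heading
-- ===== SOURCE A (Python) =====
-- def extract_first_heading(text: str) -> str | None:
--     in_comment = False
--     for raw_line in text.splitlines():
--         line = raw_line.strip()
--         if not line:
--             continue
--         if in_comment:
--             if "-->" in line:
--                 in_comment = False
--             continue
--         if line.startswith("<!--"):
--             if "-->" not in line:
--                 in_comment = True
--             continue
--         if line.startswith("#"):
--             return line
--         return None
--     return None
-- ===== SOURCE B (Python) =====
-- def extract_first_heading(text: str) -> str | None:
--     line = _first_relevant(text.splitlines())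
--     return line if line is not None and line.startswith("#") else None
--
--
-- def _first_relevant(lines: list[str]) -> str | None:
--     """First stripped line that is neither blank nor HTML-comment text.
--
--     Multi-line comments are skipped by a single index search for the
--     closing line followed by a jump, instead of a per-line state flag.
--     """
--     i, n = 0, len(lines)
--     while i < n:
--         line = lines[i].strip()
--         if not line:
--             i += 1
--         elif line.startswith("<!--"):
--             if "-->" in line:
--                 i += 1
--             else:
--                 j = next((k for k in range(i + 1, n) if "-->" in lines[k].strip()), None)
--                 if j is None:
--                     return None
--                 i = j + 1
--         else:
--             return line
--     return None
-- ===== Notes on version B (the rewrite author's own statement) =====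
-- stated objective: alternative
-- what changed: Splits the task into two stages: a helper that finds the first relevant line by index jumps (skipping a whole multi-line comment with one search for its closing line instead of A's per-line in_comment flag), and a separate final heading test hoisted out of the loop.
import Mathlib
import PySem

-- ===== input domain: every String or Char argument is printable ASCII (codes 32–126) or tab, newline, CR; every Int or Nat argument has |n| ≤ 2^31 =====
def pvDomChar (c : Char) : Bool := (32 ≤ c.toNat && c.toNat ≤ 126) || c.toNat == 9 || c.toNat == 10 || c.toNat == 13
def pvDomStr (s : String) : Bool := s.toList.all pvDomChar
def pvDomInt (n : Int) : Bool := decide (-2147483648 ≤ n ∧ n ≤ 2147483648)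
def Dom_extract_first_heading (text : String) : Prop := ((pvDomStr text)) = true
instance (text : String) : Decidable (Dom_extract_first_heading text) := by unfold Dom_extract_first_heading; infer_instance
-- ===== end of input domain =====

-- B stages the task: an index-jumping search for the first relevant line (one search per
-- multi-line comment instead of A's per-line in_comment flag), then a separate heading-test decision.

-- ===== PORT A =====
-- A's loop with the in_comment flag, as structural recursion over the remaining lines.
def extractGoA (inComment : Bool) : List String → Option String
  | [] => none
  | raw :: rest =>
    let line := PySem.Str.strip raw
    if line = "" then extractGoA inComment rest
    else if inComment then
      if PySem.Str.isIn "-->" line then extractGoA false rest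
      else extractGoA inComment rest
    else if PySem.Str.startswith line "<!--" then
      if !(PySem.Str.isIn "-->" line) then extractGoA true rest
      else extractGoA false rest
    else if PySem.Str.startswith line "#" then some line
    else none

def extract_first_heading (text : String) : Option String :=
  extractGoA false (PySem.Str.splitlines text)

-- ===== PORT B =====
-- B's search for the closing line of a multi-line comment: next(k for k in range(i+1, n) …).
-- fuel is a pure totality guard (the index loops always terminate in Python because the
-- index strictly increases; fuel = the number of remaining positions makes that structural).
def closeSearch (lines : List String) (fuel k : Nat) : Option Nat :=
  match fuel with
  | 0 => none
  | fuel + 1 =>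
    if h : k < lines.length then
      if PySem.Str.isIn "-->" (PySem.Str.strip lines[k]) then some k
      else closeSearch lines fuel (k + 1)
    else none

-- B's _first_relevant: index loop over the lines with a jump past a whole comment.
def firstRelevant (lines : List String) (fuel i : Nat) : Option String :=
  match fuel with
  | 0 => none
  | fuel + 1 =>
    if h : i < lines.length then
      let line := PySem.Str.strip lines[i]
      if line = "" then firstRelevant lines fuel (i + 1)
      else if PySem.Str.startswith line "<!--" then
        if PySem.Str.isIn "-->" line then firstRelevant lines fuel (i + 1)
        else
          match closeSearch lines (lines.length - i) (i + 1) with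
          | none => none
          | some j => firstRelevant lines fuel (j + 1)
      else some line
    else none

def extract_first_heading_alt (text : String) : Option String :=
  let lines := PySem.Str.splitlines text
  match firstRelevant lines lines.length 0 with
  | some line => if PySem.Str.startswith line "#" then some line else none
  | none => none

-- ===== PRECONDITION & SPEC =====
def Spec_extract_first_heading (text : String) (out : Option String) : Prop := out = extract_first_heading_alt text
instance (text : String) (out : Option String) : Decidable (Spec_extract_first_heading text out) := by unfold Spec_extract_first_heading; infer_instance

-- ===== CLAIM (what is proved, stated in full; the proofs are below) =====
def Claim_equal_extract_first_heading : Prop := ∀ (text : String), Dom_extract_first_heading text → Spec_extract_first_heading text (extract_first_heading text)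

-- ===== LEMMAS AND PROOFS =====

-- the heading-test decision B makes once, after its search
def wrapB : Option String → Option String
  | some line => if PySem.Str.startswith line "#" then some line else none
  | none => none

theorem closeSearch_ge (lines : List String) (fuel k j : Nat)
    (h : closeSearch lines fuel k = some j) : k ≤ j := by
  induction fuel generalizing k with
  | zero => simp [closeSearch] at h
  | succ fuel ih =>
    rw [closeSearch] at h
    split_ifs at h with h1 h2
    · injection h with h; omega
    · exact Nat.le_of_succ_le (ih (k + 1) h)

-- A's in_comment = true phase is exactly B's closeSearch followed by the jump.
theorem extractGoA_true_eq (lines : List String) (fuel k : Nat)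
    (hf : lines.length ≤ k + fuel) :
    extractGoA true (lines.drop k) =
      match closeSearch lines fuel k with
      | none => none
      | some j => extractGoA false (lines.drop (j + 1)) := by
  induction fuel generalizing k with
  | zero =>
    rw [List.drop_eq_nil_of_le (by omega), closeSearch]
    simp [extractGoA]
  | succ fuel ih =>
    rw [closeSearch]
    by_cases hk : k < lines.length
    · rw [List.drop_eq_getElem_cons hk]
      by_cases hc : PySem.Str.isIn "-->" (PySem.Str.strip lines[k]) = true
      · have hne : PySem.Str.strip lines[k] ≠ "" := by
          intro he; rw [he] at hc; exact absurd hc (by decide)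
        simp at hc hne
        simp [extractGoA, hne, hc, hk]
      · have ih' := ih (k + 1) (by omega)
        simp at hc
        by_cases he : PySem.Str.strip lines[k] = "" <;>
          simp [extractGoA, he, hc, hk, ih',
            show PySem.Chars.isIn ['-', '-', '>'] [] = false from by decide]
    · rw [List.drop_eq_nil_of_le (by omega)]
      simp [extractGoA, hk]

-- A's in_comment = false phase equals B's search wrapped with the final heading-test decision.
theorem extractGoA_false_eq (lines : List String) (fuel i : Nat)
    (hf : lines.length ≤ i + fuel) :
    extractGoA false (lines.drop i) = wrapB (firstRelevant lines fuel i) := by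
  induction fuel generalizing i with
  | zero =>
    rw [List.drop_eq_nil_of_le (by omega), firstRelevant]
    simp [extractGoA, wrapB]
  | succ fuel ih =>
    rw [firstRelevant]
    by_cases hk : i < lines.length
    · rw [List.drop_eq_getElem_cons hk]
      by_cases he : PySem.Str.strip lines[i] = ""
      · have ih' := ih (i + 1) (by omega)
        simp [extractGoA, he, hk, ih']
      · by_cases hcm : PySem.Str.startswith (PySem.Str.strip lines[i]) "<!--" = true
        · by_cases hc : PySem.Str.isIn "-->" (PySem.Str.strip lines[i]) = true
          · have ih' := ih (i + 1) (by omega)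
            simp at he hcm hc
            simp [extractGoA, he, hcm, hc, hk, ih']
          · have ht := extractGoA_true_eq lines (lines.length - i) (i + 1) (by omega)
            cases hj : closeSearch lines (lines.length - i) (i + 1) with
            | none =>
              rw [hj] at ht
              simp at he hcm hc
              simp [extractGoA, he, hcm, hc, hk, ht, wrapB]
            | some j =>
              rw [hj] at ht
              have hji : i + 1 ≤ j := closeSearch_ge lines _ _ _ hj
              have ih' := ih (j + 1) (by omega)
              simp at he hcm hc
              simp [extractGoA, he, hcm, hc, hk, ht, ih']
        · simp at he hcm
          by_cases hh : PySem.Chars.startswith (PySem.Chars.strip lines[i].toList) ['#'] = true <;>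
            simp [extractGoA, he, hcm, hk, wrapB, hh]
    · rw [List.drop_eq_nil_of_le (by omega)]
      simp [extractGoA, hk, wrapB]

-- ===== VERDICT (by name: the statement is the Claim_ definition above) =====
theorem extract_first_heading_spec : Claim_equal_extract_first_heading := by
  intro text _
  unfold Spec_extract_first_heading extract_first_heading extract_first_heading_alt
  have := extractGoA_false_eq (PySem.Str.splitlines text) (PySem.Str.splitlines text).length 0 (by omega)
  simpa [wrapB] using this
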